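-- pv_equiv track=rewrite | github.com/nilamben/Python-Program | CreditcardValidation.py | sumOfEvenPosition
-- ===== SOURCE A (Python) =====
-- def sumOfEvenPosition(no):
--     even=''
--     no=no[:-1]
--     for n in no[::-2]:
--         double=int(n)*2
--
--         if len(str(double))==2:
--             add=0
--             for ch in str(double):
--                 add=int(ch)+add
--             even=str(add)+even
--         else:
--             even=str(double)+even
--
--     sumEven = sumOfEvenSingleDigit(even)
--     return sumEven
--
-- def sumOfEvenSingleDigit(even):
--     sum=0
--     for no in str(even):
--         sum=int(no)+sum
--     return sum
-- ===== SOURCE B (Python) =====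
-- def sumOfEvenPosition(no):
--     total = 0
--     for ch in no[:-1][::-2]:
--         d = int(ch) * 2
--         total += d - 9 if d >= 10 else d
--     return total
-- ===== Notes on version B (the rewrite author's own statement) =====
-- stated objective: simpler
-- what changed: One accumulating pass that adds (2d-9 if 2d>=10 else 2d) per digit directly, instead of building an intermediate digit string via str/int round-trips and re-scanning it with a second helper loop.
import Mathlib
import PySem

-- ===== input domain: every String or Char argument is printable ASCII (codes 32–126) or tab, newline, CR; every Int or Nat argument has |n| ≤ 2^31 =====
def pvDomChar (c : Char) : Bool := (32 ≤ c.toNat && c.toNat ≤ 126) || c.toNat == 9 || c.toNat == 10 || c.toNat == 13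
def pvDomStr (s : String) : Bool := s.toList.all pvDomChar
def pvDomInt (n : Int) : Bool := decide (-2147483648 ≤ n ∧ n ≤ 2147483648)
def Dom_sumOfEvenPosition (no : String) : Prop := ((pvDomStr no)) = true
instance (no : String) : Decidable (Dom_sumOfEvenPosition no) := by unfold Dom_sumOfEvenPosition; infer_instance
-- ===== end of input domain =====

-- B replaces A's build-a-digit-string-then-rescan (two loops plus str/int round-trips) by a
-- single accumulating pass over the same characters; same values, a simpler decomposition.

-- ===== PORT A =====
-- helper sumOfEvenSingleDigit: sums int(ch) over the characters of the accumulated string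
def sumOfEvenSingleDigit (even : List Char) : Int :=
  even.foldl (fun s c => (PySem.Int.ofChars? [c]).getD 0 + s) 0
  -- (Pre_ guarantees ofChars? is some; getD 0 is never the ValueError case inside Pre_)

-- A's loop body: prepend str(add)/str(double) to `even`
def luhnStep (even : List Char) (n : Char) : List Char :=
  let double := (PySem.Int.ofChars? [n]).getD 0 * 2
  if (PySem.Int.toChars double).length = 2 then
    let add := (PySem.Int.toChars double).foldl
      (fun add ch => (PySem.Int.ofChars? [ch]).getD 0 + add) 0
    PySem.Int.toChars add ++ even
  else
    PySem.Int.toChars double ++ even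

def sumOfEvenPosition (no : String) : Int :=
  let m := PySem.List.slice no.toList none (some (-1))          -- no[:-1]
  let L := (PySem.List.slice? m none none (-2)).getD []          -- no[::-2]; step ≠ 0, never none
  sumOfEvenSingleDigit (L.foldl luhnStep [])

-- ===== PORT B =====
def altStep (total : Int) (ch : Char) : Int :=
  let d := (PySem.Int.ofChars? [ch]).getD 0 * 2
  total + (if 10 ≤ d then d - 9 else d)

def sumOfEvenPosition_alt (no : String) : Int :=
  ((PySem.List.slice? no.toList.dropLast none none (-2)).getD []).foldl altStep 0

-- ===== PRECONDITION & SPEC =====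
-- Pre_: every character that int() is applied to (those of no[:-1][::-2]) is a decimal digit;
-- on any other character both A and B raise ValueError.
def Pre_sumOfEvenPosition (no : String) : Prop :=
  ((PySem.List.slice? no.toList.dropLast none none (-2)).getD []).all
    (fun c => decide (c ∈ ['0','1','2','3','4','5','6','7','8','9'])) = true
instance (no : String) : Decidable (Pre_sumOfEvenPosition no) := by
  unfold Pre_sumOfEvenPosition; infer_instance

def pvWitness_sumOfEvenPosition : String := "12345"

def Spec_sumOfEvenPosition (no : String) (out : Int) : Prop := out = sumOfEvenPosition_alt no
instance (no : String) (out : Int) : Decidable (Spec_sumOfEvenPosition no out) := by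
  unfold Spec_sumOfEvenPosition; infer_instance

-- ===== CLAIM (what is proved, stated in full; the proofs are below) =====
def Claim_equal_sumOfEvenPosition : Prop := ∀ (no : String), Dom_sumOfEvenPosition no → Pre_sumOfEvenPosition no → Spec_sumOfEvenPosition no (sumOfEvenPosition no)

-- ===== LEMMAS AND PROOFS =====
-- digit value of a character, and B's per-character contribution
def pvDv (c : Char) : Int := (PySem.Int.ofChars? [c]).getD 0
def pvContrib (c : Char) : Int := if 10 ≤ pvDv c * 2 then pvDv c * 2 - 9 else pvDv c * 2

theorem pv_foldl_dv (xs : List Char) (init : Int) :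
    xs.foldl (fun s c => (PySem.Int.ofChars? [c]).getD 0 + s) init
      = init + (xs.map pvDv).sum := by
  induction xs generalizing init with
  | nil => simp
  | cons a l ih => simp [pvDv, ih]; ring

theorem pv_sumDigits_eq (xs : List Char) :
    sumOfEvenSingleDigit xs = (xs.map pvDv).sum := by
  simp [sumOfEvenSingleDigit, pv_foldl_dv]

theorem pv_altStep_fold (L : List Char) (init : Int) :
    L.foldl altStep init = init + (L.map pvContrib).sum := by
  induction L generalizing init with
  | nil => simp
  | cons a l ih => simp [altStep, pvContrib, pvDv, ih]; ring

theorem pv_luhnStep_append (acc : List Char) (c : Char) :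
    luhnStep acc c = luhnStep [] c ++ acc := by
  unfold luhnStep
  by_cases h : (PySem.Int.toChars ((PySem.Int.ofChars? [c]).getD 0 * 2)).length = 2 <;> simp [h]

theorem pv_piece_sum (c : Char) (hc : c ∈ ['0','1','2','3','4','5','6','7','8','9']) :
    ((luhnStep [] c).map pvDv).sum = pvContrib c := by
  fin_cases hc <;> decide

theorem pv_luhnStep_sum (acc : List Char) (c : Char)
    (hc : c ∈ ['0','1','2','3','4','5','6','7','8','9']) :
    ((luhnStep acc c).map pvDv).sum = pvContrib c + (acc.map pvDv).sum := by
  rw [pv_luhnStep_append, List.map_append, List.sum_append, pv_piece_sum c hc]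

theorem pv_luhn_fold (L : List Char) (h : ∀ c ∈ L, c ∈ ['0','1','2','3','4','5','6','7','8','9'])
    (acc : List Char) :
    ((L.foldl luhnStep acc).map pvDv).sum = (L.map pvContrib).sum + (acc.map pvDv).sum := by
  induction L generalizing acc with
  | nil => simp
  | cons a l ih =>
      have ha := h a (by simp)
      have hl : ∀ c ∈ l, c ∈ ['0','1','2','3','4','5','6','7','8','9'] := by
        intro c hc; exact h c (by simp [hc])
      simp only [List.foldl_cons, ih hl, pv_luhnStep_sum acc a ha, List.map_cons, List.sum_cons]
      ring

-- ===== VERDICT (by name: the statement is the Claim_ definition above) =====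
theorem sumOfEvenPosition_spec : Claim_equal_sumOfEvenPosition := by
  intro no _ hpre
  unfold Pre_sumOfEvenPosition at hpre
  have hpre' : ∀ c ∈ (PySem.List.slice? no.toList.dropLast none none (-2)).getD [],
      c ∈ ['0','1','2','3','4','5','6','7','8','9'] := by simpa using hpre
  unfold Spec_sumOfEvenPosition sumOfEvenPosition sumOfEvenPosition_alt
  rw [PySem.List.slice_to_neg_one]
  rw [pv_sumDigits_eq, pv_luhn_fold _ hpre' [], pv_altStep_fold]
  simp
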